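-- pv_equiv track=rewrite | github.com/karthikchiru12/SARAMSH | saramsh_package/saramsh.py | __get_ni
-- ===== SOURCE A (Python) =====
-- def __get_ni(corpus, vector):
--     '''
--     Returns the value, each feature present in how many documents
--     '''
--     k = 0
--     count = 0
--     li = list(vector)
--     li_count = []
--     for i in li:
--         for j in corpus:
--             row = j.split()
--             if i in row:
--                 count += 1
--         li_count.append(count + 1)
--         count = 0
--     return li_count
-- ===== SOURCE B (Python) =====
-- def __get_ni(corpus, vector):
--     '''
--     Returns the value, each feature present in how many documents
--     '''
--     df = {}
--     for doc in corpus: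
--         for w in dict.fromkeys(doc.split()):
--             df[w] = df.get(w, 0) + 1
--     return [df.get(w, 0) + 1 for w in vector]
-- ===== Notes on version B (the rewrite author's own statement) =====
-- stated objective: faster
-- what changed: Instead of re-scanning and re-splitting the whole corpus for every vector feature, B splits each document once, aggregates document frequencies of all words into a dict in a single pass over the corpus, then answers each feature by an O(1) lookup.
import Mathlib
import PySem

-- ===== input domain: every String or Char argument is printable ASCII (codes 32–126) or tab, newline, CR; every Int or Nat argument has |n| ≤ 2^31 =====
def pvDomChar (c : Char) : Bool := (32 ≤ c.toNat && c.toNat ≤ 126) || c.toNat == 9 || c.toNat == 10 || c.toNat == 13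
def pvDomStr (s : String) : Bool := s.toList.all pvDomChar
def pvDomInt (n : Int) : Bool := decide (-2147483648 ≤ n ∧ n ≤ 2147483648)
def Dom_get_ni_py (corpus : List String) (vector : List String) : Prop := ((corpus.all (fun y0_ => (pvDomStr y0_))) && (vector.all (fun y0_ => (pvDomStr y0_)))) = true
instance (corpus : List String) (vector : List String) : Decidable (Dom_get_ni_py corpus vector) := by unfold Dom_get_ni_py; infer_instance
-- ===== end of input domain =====

-- ===== PORT A =====
-- B replaces A's per-feature corpus rescan by one document-frequency dict built in a single corpus pass (faster).
def get_ni_py (corpus : List String) (vector : List String) : List Int :=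
  -- k is unused in A; count starts at 0 and is reset to 0 after each feature
  let li := vector
  let st := li.foldl (fun (st : Int × List Int) i =>
      let count := corpus.foldl (fun count j =>
          let row := PySem.Str.split₀ j
          if i ∈ row then count + 1 else count) st.1
      (0, st.2 ++ [count + 1])) (0, ([] : List Int))
  st.2

-- ===== PORT B =====
def get_ni_py_alt (corpus : List String) (vector : List String) : List Int :=
  let df := corpus.foldl (fun (df : PySem.Dict String Int) doc =>
      (PySem.List.dedup (PySem.Str.split₀ doc)).foldl
        (fun df w => df.insert w (df.getD w 0 + 1)) df)
    PySem.Dict.empty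
  vector.map (fun w => df.getD w 0 + 1)

-- ===== PRECONDITION & SPEC =====
def Spec_get_ni_py (corpus : List String) (vector : List String) (out : List Int) : Prop := out = get_ni_py_alt corpus vector
instance (corpus : List String) (vector : List String) (out : List Int) : Decidable (Spec_get_ni_py corpus vector out) := by unfold Spec_get_ni_py; infer_instance

-- ===== CLAIM (what is proved, stated in full; the proofs are below) =====
def Claim_equal_get_ni_py : Prop := ∀ (corpus : List String) (vector : List String), Dom_get_ni_py corpus vector → Spec_get_ni_py corpus vector (get_ni_py corpus vector)

-- ===== LEMMAS AND PROOFS =====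

-- B's dict after the corpus pass holds, for each word, the number of documents containing it
theorem pv_df_getD (corpus : List String) (d : PySem.Dict String Int) (w : String) :
    (corpus.foldl (fun df doc => (PySem.List.dedup (PySem.Str.split₀ doc)).foldl
        (fun df w => df.insert w (df.getD w 0 + 1)) df) d).getD w 0
      = d.getD w 0 + (corpus.countP (fun j => decide (w ∈ PySem.Str.split₀ j)) : Int) := by
  induction corpus generalizing d with
  | nil => simp
  | cons j rest ih =>
    simp only [List.foldl_cons, List.countP_cons]
    rw [ih, PySem.Dict.getD_foldl_insert_add_one]
    by_cases h : w ∈ PySem.Str.split₀ j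
    · rw [List.count_eq_one_of_mem (PySem.List.nodup_dedup _) ((PySem.List.mem_dedup _ _).2 h)]
      simp [h]; ring
    · rw [List.count_eq_zero.2 (fun hm => h ((PySem.List.mem_dedup _ _).1 hm))]
      simp [h]

-- A's inner corpus scan for one feature is a countP
theorem pv_inner (i : String) (corpus : List String) (c0 : Int) :
    corpus.foldl (fun c j => if i ∈ PySem.Str.split₀ j then c + 1 else c) c0
      = c0 + (corpus.countP (fun j => decide (i ∈ PySem.Str.split₀ j)) : Int) := by
  simpa using PySem.List.foldl_count_if (fun j => decide (i ∈ PySem.Str.split₀ j)) corpus c0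

-- A's outer fold: the carried counter is 0 at each step, the list grows by countP+1
theorem pv_a_fold (corpus : List String) (vector : List String) (acc : List Int) :
    (vector.foldl (fun (st : Int × List Int) i =>
        let count := corpus.foldl (fun count j =>
            let row := PySem.Str.split₀ j
            if i ∈ row then count + 1 else count) st.1
        (0, st.2 ++ [count + 1])) ((0 : Int), acc)).2
      = acc ++ vector.map (fun i =>
          (corpus.countP (fun j => decide (i ∈ PySem.Str.split₀ j)) : Int) + 1) := by
  induction vector generalizing acc with
  | nil => simp
  | cons i rest ih =>
    simp only [List.foldl_cons, List.map_cons]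
    rw [ih]
    simp [pv_inner]

-- ===== VERDICT (by name: the statement is the Claim_ definition above) =====
theorem get_ni_py_spec : Claim_equal_get_ni_py := by
  intro corpus vector _
  unfold Spec_get_ni_py get_ni_py get_ni_py_alt
  rw [pv_a_fold]
  simp only [List.nil_append]
  refine List.map_congr_left (fun i _ => ?_)
  rw [pv_df_getD]
  simp [PySem.Dict.getD, PySem.Dict.empty, PySem.Dict.get?]
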